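-- pv_equiv track=rewrite | github.com/loamCode/traceability | GLN Maker for GitHub (1).py | GLNMaker
-- ===== SOURCE A (Python) =====
-- def GLNMaker(prefix, ID):
--     if len(str(prefix)) + len(str(ID)) == 12:
--         GLN = str(prefix) + str(ID)
--         checksum = 0
--         index = 1
--         for i in GLN:
--             if index%2 == 0:
--                 checksum = checksum + int(i)*3
--             else:
--                 checksum = checksum + int(i)
--             index += 1
--         checkdigit = 10 - int(str(checksum)[-1:])
--         if checkdigit == 10:
--             checkdigit = 0
--         GLN = GLN + str(checkdigit)
--         return(GLN)
--     else:
--         pass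
-- ===== SOURCE B (Python) =====
-- def GLNMaker(prefix, ID):
--     gln = str(prefix) + str(ID)
--     if len(gln) != 12:
--         return None
--     checksum = 0
--     for i in range(0, 12, 2):
--         checksum += int(gln[i]) + 3 * int(gln[i + 1])
--     return gln + str((10 - checksum % 10) % 10)
-- ===== Notes on version B (the rewrite author's own statement) =====
-- stated objective: simpler
-- what changed: B builds the candidate string first and returns None early, sums the weighted digits two at a time over a step-2 range instead of a per-character loop with a running index-parity test, and computes the check digit by the closed form (10 - checksum % 10) % 10 instead of parsing the last character of str(checksum) and patching the 10 case.
import Mathlib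
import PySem

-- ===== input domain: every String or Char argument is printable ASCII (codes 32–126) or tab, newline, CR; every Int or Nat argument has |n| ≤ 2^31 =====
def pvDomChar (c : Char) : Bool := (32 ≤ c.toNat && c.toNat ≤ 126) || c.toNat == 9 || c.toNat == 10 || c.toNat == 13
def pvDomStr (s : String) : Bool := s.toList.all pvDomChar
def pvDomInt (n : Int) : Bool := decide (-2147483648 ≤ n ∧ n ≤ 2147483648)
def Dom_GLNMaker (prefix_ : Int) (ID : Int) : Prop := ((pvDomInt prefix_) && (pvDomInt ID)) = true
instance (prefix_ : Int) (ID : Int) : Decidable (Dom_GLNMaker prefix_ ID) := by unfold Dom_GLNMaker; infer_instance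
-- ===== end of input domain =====

-- B computes the same GLN but with an early None return, a step-2 loop taking two digits
-- per iteration, and the closed-form check digit (10 - checksum % 10) % 10 (objective: simpler).
-- Strings are represented by their character lists (String.ofList at the end); exact for ASCII.

-- int(x) for a short string, ported as PySem.Int.ofChars? with a default:
-- exact whenever the parse succeeds (under Pre_GLNMaker every use is on a digit
-- character); on a non-digit Python raises ValueError, which Pre_GLNMaker excludes.
def pyIntChars (cs : List Char) : Int := (PySem.Int.ofChars? cs).getD 0

-- ===== PORT A =====
def GLNMaker (prefix_ : Int) (ID : Int) : Option String :=
  if (PySem.Int.toChars prefix_).length + (PySem.Int.toChars ID).length = 12 then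
    let GLN : List Char := PySem.Int.toChars prefix_ ++ PySem.Int.toChars ID
    -- for i in GLN: parity test on the running 1-based index, weight 3 on even indices
    let st := GLN.foldl (fun (st : Int × Int) i =>
        (if PySem.Int.mod st.2 2 = 0 then st.1 + pyIntChars [i] * 3 else st.1 + pyIntChars [i],
         st.2 + 1)) (0, 1)
    let checksum := st.1
    -- int(str(checksum)[-1:])
    let checkdigit := 10 - pyIntChars (PySem.List.slice (PySem.Int.toChars checksum) (some (-1)) none)
    let checkdigit := if checkdigit = 10 then 0 else checkdigit
    some (String.ofList (GLN ++ PySem.Int.toChars checkdigit))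
  else
    none

-- ===== PORT B =====
def GLNMaker_alt (prefix_ : Int) (ID : Int) : Option String :=
  let gln : List Char := PySem.Int.toChars prefix_ ++ PySem.Int.toChars ID
  if gln.length ≠ 12 then
    none
  else
    -- for i in range(0, 12, 2): two digits per iteration
    let checksum := (PySem.List.pyRange 0 12 2).foldl
      (fun acc i =>
        acc + pyIntChars [PySem.List.pyGetD gln i ' ']
            + 3 * pyIntChars [PySem.List.pyGetD gln (i + 1) ' ']) 0
    some (String.ofList (gln ++ PySem.Int.toChars (PySem.Int.mod (10 - PySem.Int.mod checksum 10) 10)))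

-- ===== PRECONDITION & SPEC =====
-- Pre_ excludes exactly the inputs where the combined decimal-string length is 12 but an
-- argument is negative: there A raises ValueError (int('-')), and B raises the same way.
def Pre_GLNMaker (prefix_ : Int) (ID : Int) : Prop :=
  (PySem.Int.toChars prefix_).length + (PySem.Int.toChars ID).length = 12 →
    (0 ≤ prefix_ ∧ 0 ≤ ID)
instance (prefix_ : Int) (ID : Int) : Decidable (Pre_GLNMaker prefix_ ID) := by
  unfold Pre_GLNMaker; infer_instance

def pvWitness_GLNMaker : Int × Int := (4000001, 54321)

def Spec_GLNMaker (prefix_ : Int) (ID : Int) (out : Option String) : Prop := out = GLNMaker_alt prefix_ ID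
instance (prefix_ : Int) (ID : Int) (out : Option String) : Decidable (Spec_GLNMaker prefix_ ID out) := by unfold Spec_GLNMaker; infer_instance

-- ===== CLAIM (what is proved, stated in full; the proofs are below) =====
def Claim_equal_GLNMaker : Prop := ∀ (prefix_ : Int) (ID : Int), Dom_GLNMaker prefix_ ID → Pre_GLNMaker prefix_ ID → Spec_GLNMaker prefix_ ID (GLNMaker prefix_ ID)

-- ===== LEMMAS AND PROOFS =====

-- every character of Nat.toDigits 10 is the digit character of some d < 10
theorem mem_toDigits_ten (m : Nat) (c : Char) (hc : c ∈ Nat.toDigits 10 m) :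
    ∃ d : Nat, d < 10 ∧ c = Nat.digitChar d := by
  induction m using Nat.strong_induction_on with
  | _ m ih =>
    rw [Nat.toDigits_eq_if (by norm_num)] at hc
    by_cases hm : m < 10
    · simp [hm] at hc
      exact ⟨m, hm, hc⟩
    · simp [hm] at hc
      rcases hc with hc | hc
      · exact ih (m / 10) (by omega) hc
      · exact ⟨m % 10, by omega, hc⟩

-- int() of a single digit character is its value
theorem parse_digitChar (d : Nat) (hd : d < 10) :
    pyIntChars [Nat.digitChar d] = (d : Int) := by
  interval_cases d <;> decide

-- str(m)[-1:] is the digit character of m % 10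
theorem slice_last_toChars (m : Nat) :
    PySem.List.slice (PySem.Int.toChars (m : Int)) (some (-1)) none
      = [Nat.digitChar (m % 10)] := by
  rw [PySem.List.slice_from_neg_one]
  have htc : PySem.Int.toChars (m : Int) = Nat.toDigits 10 m := by
    simp [PySem.Int.toChars]
  rw [htc, Nat.toDigits_eq_if (b := 10) (n := m) (by norm_num)]
  by_cases hm : m < 10
  · simp [hm, Nat.mod_eq_of_lt hm]
  · simp [hm]

-- the normalized forms of A's patched check digit and of B's closed form agree
theorem cd_closed (m : Nat) :
    (if pyIntChars (PySem.List.slice (PySem.Int.toChars (m : Int)) (some (-1)) none) = 0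
     then (0 : Int)
     else 10 - pyIntChars (PySem.List.slice (PySem.Int.toChars (m : Int)) (some (-1)) none))
      = -((m : Int) % 10) % 10 := by
  rw [slice_last_toChars, parse_digitChar (m % 10) (by omega)]
  have hcast : ((m % 10 : Nat) : Int) = (m : Int) % 10 := by push_cast; ring
  rw [← hcast]
  have hk : m % 10 < 10 := by omega
  set k := m % 10 with hkdef
  clear_value k
  interval_cases k <;> decide

-- a list of length 12 is an explicit 12-tuple of elements
theorem list_len12 {α : Type} (l : List α) (h : l.length = 12) :
    ∃ a b c d e f g h' i j k m, l = [a, b, c, d, e, f, g, h', i, j, k, m] := by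
  match l, h with
  | [a, b, c, d, e, f, g, h', i, j, k, m], _ =>
    exact ⟨a, b, c, d, e, f, g, h', i, j, k, m, rfl⟩

-- ===== VERDICT (by name: the statement is the Claim_ definition above) =====
theorem GLNMaker_spec : Claim_equal_GLNMaker := by
  intro p ID hdom hpre
  unfold Spec_GLNMaker GLNMaker GLNMaker_alt
  by_cases h12 : (PySem.Int.toChars p).length + (PySem.Int.toChars ID).length = 12
  · obtain ⟨hp, hID⟩ := hpre h12
    have hlen : (PySem.Int.toChars p ++ PySem.Int.toChars ID).length = 12 := by
      simp [h12]
    -- every character of the concatenation is a digit character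
    have hdig : ∀ c ∈ PySem.Int.toChars p ++ PySem.Int.toChars ID,
        ∃ d : Nat, d < 10 ∧ c = Nat.digitChar d := by
      intro c hc
      rcases List.mem_append.mp hc with hc | hc
      · have : PySem.Int.toChars p = Nat.toDigits 10 p.toNat := by
          simp [PySem.Int.toChars, show ¬ p < 0 by omega]
        exact mem_toDigits_ten p.toNat c (this ▸ hc)
      · have : PySem.Int.toChars ID = Nat.toDigits 10 ID.toNat := by
          simp [PySem.Int.toChars, show ¬ ID < 0 by omega]
        exact mem_toDigits_ten ID.toNat c (this ▸ hc)
    obtain ⟨a, b, c, d, e, f, g, h', i, j, k, m, hl⟩ :=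
      list_len12 (PySem.Int.toChars p ++ PySem.Int.toChars ID) hlen
    have hdig' : ∀ c' ∈ [a, b, c, d, e, f, g, h', i, j, k, m],
        ∃ d' : Nat, d' < 10 ∧ c' = Nat.digitChar d' := hl ▸ hdig
    obtain ⟨d0, hb0, rfl⟩ := hdig' a (by simp)
    obtain ⟨d1, hb1, rfl⟩ := hdig' b (by simp)
    obtain ⟨d2, hb2, rfl⟩ := hdig' c (by simp)
    obtain ⟨d3, hb3, rfl⟩ := hdig' d (by simp)
    obtain ⟨d4, hb4, rfl⟩ := hdig' e (by simp)
    obtain ⟨d5, hb5, rfl⟩ := hdig' f (by simp)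
    obtain ⟨d6, hb6, rfl⟩ := hdig' g (by simp)
    obtain ⟨d7, hb7, rfl⟩ := hdig' h' (by simp)
    obtain ⟨d8, hb8, rfl⟩ := hdig' i (by simp)
    obtain ⟨d9, hb9, rfl⟩ := hdig' j (by simp)
    obtain ⟨d10, hb10, rfl⟩ := hdig' k (by simp)
    obtain ⟨d11, hb11, rfl⟩ := hdig' m (by simp)
    rw [hl]
    have hrange : PySem.List.pyRange 0 12 2 = [0, 2, 4, 6, 8, 10] := by decide
    rw [if_pos h12, hrange]
    have hm1 : PySem.Int.mod 1 2 = 1 := rfl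
    have hg0 : PySem.List.pyGetD [d0.digitChar, d1.digitChar, d2.digitChar, d3.digitChar, d4.digitChar, d5.digitChar, d6.digitChar, d7.digitChar, d8.digitChar, d9.digitChar, d10.digitChar, d11.digitChar] (0) ' ' = d0.digitChar := rfl
    have hg1 : PySem.List.pyGetD [d0.digitChar, d1.digitChar, d2.digitChar, d3.digitChar, d4.digitChar, d5.digitChar, d6.digitChar, d7.digitChar, d8.digitChar, d9.digitChar, d10.digitChar, d11.digitChar] (0 + 1) ' ' = d1.digitChar := rfl
    have hg2 : PySem.List.pyGetD [d0.digitChar, d1.digitChar, d2.digitChar, d3.digitChar, d4.digitChar, d5.digitChar, d6.digitChar, d7.digitChar, d8.digitChar, d9.digitChar, d10.digitChar, d11.digitChar] (2) ' ' = d2.digitChar := rfl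
    have hg3 : PySem.List.pyGetD [d0.digitChar, d1.digitChar, d2.digitChar, d3.digitChar, d4.digitChar, d5.digitChar, d6.digitChar, d7.digitChar, d8.digitChar, d9.digitChar, d10.digitChar, d11.digitChar] (2 + 1) ' ' = d3.digitChar := rfl
    have hg4 : PySem.List.pyGetD [d0.digitChar, d1.digitChar, d2.digitChar, d3.digitChar, d4.digitChar, d5.digitChar, d6.digitChar, d7.digitChar, d8.digitChar, d9.digitChar, d10.digitChar, d11.digitChar] (4) ' ' = d4.digitChar := rfl
    have hg5 : PySem.List.pyGetD [d0.digitChar, d1.digitChar, d2.digitChar, d3.digitChar, d4.digitChar, d5.digitChar, d6.digitChar, d7.digitChar, d8.digitChar, d9.digitChar, d10.digitChar, d11.digitChar] (4 + 1) ' ' = d5.digitChar := rfl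
    have hg6 : PySem.List.pyGetD [d0.digitChar, d1.digitChar, d2.digitChar, d3.digitChar, d4.digitChar, d5.digitChar, d6.digitChar, d7.digitChar, d8.digitChar, d9.digitChar, d10.digitChar, d11.digitChar] (6) ' ' = d6.digitChar := rfl
    have hg7 : PySem.List.pyGetD [d0.digitChar, d1.digitChar, d2.digitChar, d3.digitChar, d4.digitChar, d5.digitChar, d6.digitChar, d7.digitChar, d8.digitChar, d9.digitChar, d10.digitChar, d11.digitChar] (6 + 1) ' ' = d7.digitChar := rfl
    have hg8 : PySem.List.pyGetD [d0.digitChar, d1.digitChar, d2.digitChar, d3.digitChar, d4.digitChar, d5.digitChar, d6.digitChar, d7.digitChar, d8.digitChar, d9.digitChar, d10.digitChar, d11.digitChar] (8) ' ' = d8.digitChar := rfl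
    have hg9 : PySem.List.pyGetD [d0.digitChar, d1.digitChar, d2.digitChar, d3.digitChar, d4.digitChar, d5.digitChar, d6.digitChar, d7.digitChar, d8.digitChar, d9.digitChar, d10.digitChar, d11.digitChar] (8 + 1) ' ' = d9.digitChar := rfl
    have hg10 : PySem.List.pyGetD [d0.digitChar, d1.digitChar, d2.digitChar, d3.digitChar, d4.digitChar, d5.digitChar, d6.digitChar, d7.digitChar, d8.digitChar, d9.digitChar, d10.digitChar, d11.digitChar] (10) ' ' = d10.digitChar := rfl
    have hg11 : PySem.List.pyGetD [d0.digitChar, d1.digitChar, d2.digitChar, d3.digitChar, d4.digitChar, d5.digitChar, d6.digitChar, d7.digitChar, d8.digitChar, d9.digitChar, d10.digitChar, d11.digitChar] (10 + 1) ' ' = d11.digitChar := rfl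
    have hlen12 : ¬ ([d0.digitChar, d1.digitChar, d2.digitChar, d3.digitChar, d4.digitChar, d5.digitChar, d6.digitChar, d7.digitChar, d8.digitChar, d9.digitChar, d10.digitChar, d11.digitChar] : List Char).length ≠ 12 := by simp
    simp only [List.foldl, hm1,
      hg0, hg1, hg2, hg3, hg4, hg5, hg6, hg7, hg8, hg9, hg10, hg11, hlen12, if_false,
      parse_digitChar d0 hb0, parse_digitChar d1 hb1, parse_digitChar d2 hb2,
      parse_digitChar d3 hb3, parse_digitChar d4 hb4, parse_digitChar d5 hb5,
      parse_digitChar d6 hb6, parse_digitChar d7 hb7, parse_digitChar d8 hb8,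
      parse_digitChar d9 hb9, parse_digitChar d10 hb10, parse_digitChar d11 hb11]
    norm_num
    have hSS : (d0:Int) + 3 * (d1:Int) + (d2:Int) + 3 * (d3:Int) + (d4:Int) + 3 * (d5:Int) + (d6:Int) + 3 * (d7:Int) + (d8:Int) + 3 * (d9:Int) + (d10:Int) + 3 * (d11:Int) = (d0:Int) + (d1:Int) * 3 + (d2:Int) + (d3:Int) * 3 + (d4:Int) + (d5:Int) * 3 + (d6:Int) + (d7:Int) * 3 + (d8:Int) + (d9:Int) * 3 + (d10:Int) + (d11:Int) * 3 := by ring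
    rw [hSS]
    obtain ⟨mm, hmm⟩ := Int.eq_ofNat_of_zero_le
      (show (0:Int) ≤ (d0:Int) + (d1:Int) * 3 + (d2:Int) + (d3:Int) * 3 + (d4:Int) + (d5:Int) * 3 + (d6:Int) + (d7:Int) * 3 + (d8:Int) + (d9:Int) * 3 + (d10:Int) + (d11:Int) * 3 by positivity)
    rw [hmm, cd_closed mm]
  · have hne : (PySem.Int.toChars p ++ PySem.Int.toChars ID).length ≠ 12 := by
      simp; exact h12
    simp only [h12, if_false, hne, ite_not]
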